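-- pv_equiv track=rewrite | github.com/Jagg2611/QuickAI | client/src/pages/test.py | translate_pattern
-- ===== SOURCE A (Python) =====
-- def translate_pattern(p: str) -> str:
--
--     out, i, in_class = [], 0, False
--     while i < len(p):
--         c = p[i]
--
--         # Preserve escapes verbatim
--         if c == "\\":
--             out.append(c)
--             i += 1
--             if i < len(p):
--                 out.append(p[i])
--                 i += 1
--             continue
--
--         # Inside […] character class
--         if in_class:
--             if c == "]":
--                 in_class = False
--             out.append(c)
--             i += 1
--             continue
--
--         if c == "[":
--             in_class = True
--             out.append(c)
--             i += 1
--             continue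
--
--         # Stand-alone wildcard *
--         if c == "*":
--             out.append(".*")
--             i += 1
--             continue
--
--         # Custom quantifier: (n,m)  or (n,)
--         if c == "(":
--             j = i + 1
--             n1 = ""
--             while j < len(p) and p[j].isdigit():
--                 n1 += p[j]
--                 j += 1
--             if n1 and j < len(p) and p[j] == ",":
--                 j += 1
--                 n2 = ""
--                 while j < len(p) and p[j].isdigit():
--                     n2 += p[j]
--                     j += 1
--                 if j < len(p) and p[j] == ")":
--                     out.append("{" + n1 + ("," + n2 if n2 else ",") + "}")
--                     i = j + 1
--                     continue
--             # Not a quantifier → treat ‘(’ literally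
--             out.append(r"\(")
--             i += 1
--             continue
--
--         # Any other character
--         out.append(c)
--         i += 1
--
--     return "".join(out)
-- ===== SOURCE B (Python) =====
-- # Token-based rewrite: instead of a char-by-char state machine with an in_class
-- # flag, consume whole tokens (escape pair, full character class, quantifier)
-- # with small helper scanners and emit one piece per token.
--
-- def _span_digits(p, j):
--     """Return first index >= j whose char is not an ASCII-decimal digit."""
--     n = len(p)
--     while j < n and p[j].isdigit():
--         j += 1
--     return j
--
-- def _class_end(p, j):
--     """Given j just after '[', return the index just past the class body
--     (escape pairs stay opaque; an unterminated class runs to the end)."""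
--     n = len(p)
--     while j < n:
--         if p[j] == "\\":
--             j = min(j + 2, n)
--         elif p[j] == "]":
--             return j + 1
--         else:
--             j += 1
--     return n
--
-- def translate_pattern(p: str) -> str:
--     pieces = []
--     i, n = 0, len(p)
--     while i < n:
--         c = p[i]
--         if c == "\\":
--             pieces.append(p[i:i + 2])
--             i += 2
--         elif c == "[":
--             j = _class_end(p, i + 1)
--             pieces.append(p[i:j])
--             i = j
--         elif c == "*":
--             pieces.append(".*")
--             i += 1
--         elif c == "(":
--             j = _span_digits(p, i + 1)
--             if j > i + 1 and j < n and p[j] == ",":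
--                 k = _span_digits(p, j + 1)
--                 if k < n and p[k] == ")":
--                     pieces.append("{" + p[i + 1:j] + "," + p[j + 1:k] + "}")
--                     i = k + 1
--                     continue
--             pieces.append("\\(")
--             i += 1
--         else:
--             pieces.append(c)
--             i += 1
--     return "".join(pieces)
-- ===== Notes on version B (the rewrite author's own statement) =====
-- stated objective: alternative
-- what changed: Replaces the char-by-char state machine with an in_class flag by a token-based single pass that consumes whole escape pairs, whole character classes and whole quantifiers with small helper scanners and emits one piece per token.
import Mathlib
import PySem

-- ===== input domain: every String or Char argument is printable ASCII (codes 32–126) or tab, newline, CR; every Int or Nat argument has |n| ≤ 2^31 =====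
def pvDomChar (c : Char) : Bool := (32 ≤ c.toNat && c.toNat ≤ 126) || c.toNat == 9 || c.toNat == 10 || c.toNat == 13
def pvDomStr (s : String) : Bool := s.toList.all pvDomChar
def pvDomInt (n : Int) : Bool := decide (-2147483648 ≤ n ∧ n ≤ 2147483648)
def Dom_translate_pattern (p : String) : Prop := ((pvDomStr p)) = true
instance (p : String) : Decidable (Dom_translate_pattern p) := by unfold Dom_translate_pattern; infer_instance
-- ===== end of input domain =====

-- B rewrites A's char-by-char state machine (in_class flag) as a token-based
-- single pass (whole escape pairs / classes / quantifiers); same output, same cost.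

-- shared digit scanner: Python's `while j < len(p) and p[j].isdigit()` loop,
-- returning the scanned digits and the remaining characters
def pvScanDigits : List Char → List Char × List Char
  | [] => ([], [])
  | c :: cs =>
    if c.isDigit then
      let (d, r) := pvScanDigits cs
      (c :: d, r)
    else ([], c :: cs)

theorem pvScanDigits_len (l : List Char) : (pvScanDigits l).2.length ≤ l.length := by
  induction l with
  | nil => simp [pvScanDigits]
  | cons c cs ih =>
    simp only [pvScanDigits]
    split
    · simpa using Nat.le_succ_of_le ih
    · simp

-- ===== PORT A =====
-- A's while loop over index i with the in_class flag, as recursion on the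
-- remaining character list (ic = in_class); branches in A's order.
def pvGoA (l : List Char) (ic : Bool) : List Char :=
  match l with
  | [] => []
  | c :: rest =>
    if c = '\\' then
      match rest with
      | [] => ['\\']
      | d :: rest' => '\\' :: d :: pvGoA rest' ic
    else if ic then
      c :: pvGoA rest (if c = ']' then false else true)
    else if c = '[' then
      c :: pvGoA rest true
    else if c = '*' then
      '.' :: '*' :: pvGoA rest false
    else if c = '(' then
      if h1 : (pvScanDigits rest).1 ≠ [] ∧ (pvScanDigits rest).2.head? = some ',' then
        if h2 : (pvScanDigits (pvScanDigits rest).2.tail).2.head? = some ')' then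
          '{' :: ((pvScanDigits rest).1 ++
              (if (pvScanDigits (pvScanDigits rest).2.tail).1 ≠ [] then
                ',' :: (pvScanDigits (pvScanDigits rest).2.tail).1 else [','])) ++
            '}' :: pvGoA (pvScanDigits (pvScanDigits rest).2.tail).2.tail false
        else
          '\\' :: '(' :: pvGoA rest false
      else
        '\\' :: '(' :: pvGoA rest false
    else
      c :: pvGoA rest false
  termination_by l.length
  decreasing_by
    · simp
    · simp
    · simp
    · simp
    · -- quantifier branch: r2.tail is shorter than the whole list
      have hs1 := pvScanDigits_len rest
      have hs2 := pvScanDigits_len (pvScanDigits rest).2.tail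
      have hne : (pvScanDigits rest).2 ≠ [] := by
        intro h; rw [h] at h1; simp at h1
      have hpos := List.length_pos_of_ne_nil hne
      simp only [List.length_tail, List.length_cons] at *
      omega
    · simp
    · simp
    · simp

def translate_pattern (p : String) : String := String.mk (pvGoA p.toList false)

-- ===== PORT B =====
-- B's helpers: consume a whole character class body (escape pairs opaque,
-- unterminated class runs to the end), returning (consumed, remainder)
def pvTakeClass : List Char → List Char × List Char
  | [] => ([], [])
  | c :: cs =>
    if c = '\\' then
      match cs with
      | [] => (['\\'], [])
      | d :: cs' =>
        let (t, r) := pvTakeClass cs'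
        ('\\' :: d :: t, r)
    else if c = ']' then ([']'], cs)
    else
      let (t, r) := pvTakeClass cs
      (c :: t, r)

theorem pvTakeClass_len_aux (n : Nat) : ∀ l : List Char, l.length ≤ n →
    (pvTakeClass l).2.length ≤ l.length := by
  induction n with
  | zero =>
    intro l hl
    have : l = [] := List.length_eq_zero_iff.mp (Nat.le_zero.mp hl)
    subst this; simp [pvTakeClass]
  | succ n ih =>
    intro l hl
    match l with
    | [] => simp [pvTakeClass]
    | c :: cs =>
      by_cases h : c = '\\'
      · subst h
        match cs with
        | [] => simp [pvTakeClass]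
        | d :: cs' =>
          have h' := ih cs' (by simp at hl; omega)
          simp [pvTakeClass]
          omega
      · by_cases h2 : c = ']'
        · subst h2; rw [pvTakeClass.eq_def]; simp
        · have h' := ih cs (by simp at hl; omega)
          rw [pvTakeClass.eq_def]
          simp [h, h2]
          omega

theorem pvTakeClass_len (l : List Char) : (pvTakeClass l).2.length ≤ l.length :=
  pvTakeClass_len_aux l.length l le_rfl

-- B's token loop: one emitted piece per token
def pvGoB (l : List Char) : List Char :=
  match l with
  | [] => []
  | c :: rest =>
    if c = '\\' then
      (c :: rest.take 1) ++ pvGoB (rest.drop 1)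
    else if c = '[' then
      '[' :: (pvTakeClass rest).1 ++ pvGoB (pvTakeClass rest).2
    else if c = '*' then
      '.' :: '*' :: pvGoB rest
    else if c = '(' then
      if h1 : (pvScanDigits rest).1 ≠ [] ∧ (pvScanDigits rest).2.head? = some ',' then
        if h2 : (pvScanDigits (pvScanDigits rest).2.tail).2.head? = some ')' then
          '{' :: (pvScanDigits rest).1 ++
            ',' :: (pvScanDigits (pvScanDigits rest).2.tail).1 ++
            '}' :: pvGoB (pvScanDigits (pvScanDigits rest).2.tail).2.tail
        else
          '\\' :: '(' :: pvGoB rest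
      else
        '\\' :: '(' :: pvGoB rest
    else
      c :: pvGoB rest
  termination_by l.length
  decreasing_by
  all_goals first
    | (have := pvTakeClass_len rest; simp; omega)
    | (have hs1 := pvScanDigits_len rest
       have hs2 := pvScanDigits_len (pvScanDigits rest).2.tail
       have hne : (pvScanDigits rest).2 ≠ [] := by
         intro h; rw [h] at h1; simp at h1
       have hpos := List.length_pos_of_ne_nil hne
       simp only [List.length_tail, List.length_cons] at *
       omega)
    | (simp; omega)
    | simp

def translate_pattern_alt (p : String) : String := String.mk (pvGoB p.toList)

-- ===== PRECONDITION & SPEC =====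
def Spec_translate_pattern (p : String) (out : String) : Prop := out = translate_pattern_alt p
instance (p : String) (out : String) : Decidable (Spec_translate_pattern p out) := by unfold Spec_translate_pattern; infer_instance

-- ===== CLAIM (what is proved, stated in full; the proofs are below) =====
def Claim_equal_translate_pattern : Prop := ∀ (p : String), Dom_translate_pattern p → Spec_translate_pattern p (translate_pattern p)

-- ===== LEMMAS AND PROOFS =====

theorem pvGo_eq (n : Nat) : ∀ l : List Char, l.length ≤ n →
    pvGoA l false = pvGoB l ∧
    pvGoA l true = (pvTakeClass l).1 ++ pvGoB (pvTakeClass l).2 := by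
  induction n with
  | zero =>
    intro l hl
    have : l = [] := List.length_eq_zero_iff.mp (Nat.le_zero.mp hl)
    subst this
    simp [pvGoA, pvGoB, pvTakeClass]
  | succ n ih =>
    intro l hl
    match l with
    | [] => simp [pvGoA, pvGoB, pvTakeClass]
    | c :: rest =>
      have hr : rest.length ≤ n := by simpa using hl
      by_cases hesc : c = '\\'
      · subst hesc
        constructor
        · rw [pvGoA.eq_def, pvGoB.eq_def]
          match rest with
          | [] => simp [pvGoB]
          | d :: rest' =>
            have : rest'.length ≤ n := by simp at hr; omega
            simp [(ih rest' this).1]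
        · rw [pvGoA.eq_def]
          match rest with
          | [] => simp [pvTakeClass, pvGoB]
          | d :: rest' =>
            have h' : rest'.length ≤ n := by simp at hr; omega
            simp only [pvTakeClass, if_pos rfl]
            simp [(ih rest' h').2]
      · constructor
        · -- not in class, not an escape
          by_cases hcl : c = '['
          · subst hcl
            rw [pvGoA.eq_def, pvGoB.eq_def]
            simp only [reduceIte]
            simpa using (ih rest hr).2
          · by_cases hst : c = '*'
            · subst hst
              rw [pvGoA.eq_def, pvGoB.eq_def]
              simp [(ih rest hr).1]
            · by_cases hpar : c = '('
              · subst hpar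
                rw [pvGoA.eq_def, pvGoB.eq_def]
                simp only [reduceIte, Bool.false_eq_true]
                by_cases h1 : (pvScanDigits rest).1 ≠ [] ∧ (pvScanDigits rest).2.head? = some ','
                · rw [dif_pos h1, dif_pos h1]
                  by_cases h2 : (pvScanDigits (pvScanDigits rest).2.tail).2.head? = some ')'
                  · rw [dif_pos h2, dif_pos h2]
                    have hlen : (pvScanDigits (pvScanDigits rest).2.tail).2.tail.length ≤ n := by
                      have hs1 := pvScanDigits_len rest
                      have hs2 := pvScanDigits_len (pvScanDigits rest).2.tail
                      simp only [List.length_tail] at *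
                      omega
                    rw [(ih _ hlen).1]
                    by_cases hn2 : (pvScanDigits (pvScanDigits rest).2.tail).1 ≠ []
                    · simp [hn2]
                    · simp at hn2; simp [hn2]
                  · rw [dif_neg h2, dif_neg h2, (ih rest hr).1]; simp
                · rw [dif_neg h1, dif_neg h1, (ih rest hr).1]; simp
              · rw [pvGoA.eq_def, pvGoB.eq_def]
                simp [hesc, hcl, hst, hpar, (ih rest hr).1]
        · -- in class
          rw [pvGoA.eq_def]
          simp only [if_neg hesc, if_pos rfl]
          by_cases hcb : c = ']'
          · subst hcb
            rw [pvTakeClass.eq_def]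
            simp [(ih rest hr).1]
          · rw [if_neg hcb]
            have hcls := (ih rest hr).2
            rw [pvTakeClass.eq_def]
            simp [hesc, hcb, hcls]

-- ===== VERDICT (by name: the statement is the Claim_ definition above) =====
theorem translate_pattern_spec : Claim_equal_translate_pattern := by
  intro p _
  unfold Spec_translate_pattern translate_pattern translate_pattern_alt
  rw [(pvGo_eq p.toList.length p.toList le_rfl).1]
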